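-- pv_equiv track=rewrite | github.com/MCSN-project2014/AElib | aelib/prefixsearch/frontcoding.py | front_decoding
-- ===== SOURCE A (Python) =====
-- def front_decoding(arrayTuples):
--     """
--
--     :param arrayTuples:  array of tuples coded with fron coding = [ (l,s),(l1;s'1)...]
--     :return:  dictionary of decoded strings in alphabetic order { 0: "first", 1:"second"}
--     """
--     dictdecoded= {}
--     prevstring = ""
--     i = 0
--     for l, codstr in arrayTuples:
--         if l > 0:
--             firststring = prevstring[:l]
--             decodestring =  firststring + codstr
--             dictdecoded[i] = decodestring
--             prevstring = decodestring
--             i += 1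
--         else:
--             dictdecoded[i] = codstr
--             prevstring = codstr
--             i +=1
--     return dictdecoded
-- ===== SOURCE B (Python) =====
-- def front_decoding(arrayTuples):
--     """Two-pass decoder: a numeric pass computes each entry's copied-prefix length,
--     then every string is assembled independently by walking back through the tuples
--     and collecting the literal character pieces it is made of."""
--     n = len(arrayTuples)
--     f = [0] * n          # f[j]: how many chars entry j actually copies from entry j-1
--     length = 0           # length of the previous decoded string
--     for j, (l, s) in enumerate(arrayTuples):
--         f[j] = min(l, length) if l > 0 else 0
--         length = f[j] + len(s)
--     result = {}
--     for i in range(n):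
--         pieces = []
--         m = f[i] + len(arrayTuples[i][1])   # length of decoded string i
--         j = i
--         while m > 0:
--             if m > f[j]:
--                 pieces.append(arrayTuples[j][1][:m - f[j]])
--                 m = f[j]
--             j -= 1
--         result[i] = ''.join(reversed(pieces))
--     return result
-- ===== Notes on version B (the rewrite author's own statement) =====
-- stated objective: alternative
-- what changed: Replaces A's single stateful pass (carrying the previous decoded string) by a numeric first pass that computes each entry's effective copied-prefix length, after which every output string is assembled independently by a backward walk over the tuples collecting the literal character pieces it is made of.
import Mathlib
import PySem

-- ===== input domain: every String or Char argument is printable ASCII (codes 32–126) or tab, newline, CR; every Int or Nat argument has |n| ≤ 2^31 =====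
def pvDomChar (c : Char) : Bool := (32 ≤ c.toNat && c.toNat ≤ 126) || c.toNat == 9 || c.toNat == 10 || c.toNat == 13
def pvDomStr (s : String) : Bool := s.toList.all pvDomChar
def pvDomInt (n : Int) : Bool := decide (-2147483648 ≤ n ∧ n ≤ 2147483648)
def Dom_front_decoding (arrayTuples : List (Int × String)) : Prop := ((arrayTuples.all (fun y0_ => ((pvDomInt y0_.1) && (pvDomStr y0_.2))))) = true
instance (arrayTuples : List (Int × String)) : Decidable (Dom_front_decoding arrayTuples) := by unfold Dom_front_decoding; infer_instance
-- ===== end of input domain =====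

-- B replaces A's single stateful pass by a different algorithm: a numeric pass computing each
-- entry's copied-prefix length, then each string is assembled independently by a backward walk
-- collecting its literal character pieces (objective: alternative; same values).

-- ===== PORT A =====
-- A's loop state: (dictdecoded, prevstring, i); strings handled as List Char (PySem convention).
def front_decoding_step (st : PySem.Dict Int String × List Char × Int) (p : Int × String) :
    PySem.Dict Int String × List Char × Int :=
  let (d, prevstring, i) := st
  if p.1 > 0 then
    let firststring := PySem.List.slice prevstring none (some p.1)
    let decodestring := firststring ++ p.2.toList
    (d.insert i (String.ofList decodestring), decodestring, i + 1)
  else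
    (d.insert i p.2, p.2.toList, i + 1)

def front_decoding (arrayTuples : List (Int × String)) : List (Int × String) :=
  (arrayTuples.foldl front_decoding_step (PySem.Dict.empty, [], 0)).1.items

-- ===== PORT B =====
-- first pass: `f[j] = min(l, length) if l > 0 else 0; length = f[j] + len(s)` — returns (f, length)
def front_decoding_passF (arrayTuples : List (Int × String)) : List Int × Int :=
  arrayTuples.foldl
    (fun st p =>
      let fj := if p.1 > 0 then min p.1 st.2 else 0
      (st.1 ++ [fj], fj + (p.2.toList.length : Int)))
    ([], 0)

-- the `while m > 0: ... j -= 1` walk, structurally on j; exact because f[0] = 0 for the f this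
-- file builds, so the Python loop always exits by the time j reaches 0 (m becomes 0 there)
def front_decoding_collect (arrayTuples : List (Int × String)) (f : List Int) :
    Nat → Int → List (List Char) → List (List Char)
  | j, m, pieces =>
    if m > 0 then
      let fj := f.getD j 0
      -- if m > f[j]: pieces.append(arrayTuples[j][1][:m - f[j]]); m = f[j]
      let pieces' := if m > fj then
        pieces ++ [PySem.List.slice (arrayTuples.getD j (0, "")).2.toList none (some (m - fj))]
        else pieces
      let m' := if m > fj then fj else m
      match j with
      | 0 => pieces'          -- j -= 1 and the loop test fails: m' = f[0] = 0
      | j' + 1 => front_decoding_collect arrayTuples f j' m' pieces'   -- j -= 1, continue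
    else pieces

-- result dict keyed 0,1,…,n-1 (fresh increasing keys): its items are exactly this indexed list
def front_decoding_alt (arrayTuples : List (Int × String)) : List (Int × String) :=
  let f := (front_decoding_passF arrayTuples).1
  (List.range arrayTuples.length).map (fun i =>
    let m := f.getD i 0 + ((arrayTuples.getD i (0, "")).2.toList.length : Int)
    ((i : Int), String.ofList ((front_decoding_collect arrayTuples f i m []).reverse.flatten)))

-- ===== PRECONDITION & SPEC =====
def Spec_front_decoding (arrayTuples : List (Int × String)) (out : List (Int × String)) : Prop := out = front_decoding_alt arrayTuples
instance (arrayTuples : List (Int × String)) (out : List (Int × String)) : Decidable (Spec_front_decoding arrayTuples out) := by unfold Spec_front_decoding; infer_instance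

-- ===== CLAIM (what is proved, stated in full; the proofs are below) =====
def Claim_equal_front_decoding : Prop := ∀ (arrayTuples : List (Int × String)), Dom_front_decoding arrayTuples → Spec_front_decoding arrayTuples (front_decoding arrayTuples)

-- ===== LEMMAS AND PROOFS =====

-- the one-entry decode step, on characters
def fdStep (prev : List Char) (p : Int × String) : List Char :=
  (if p.1 > 0 then PySem.List.slice prev none (some p.1) else []) ++ p.2.toList

-- the copied-prefix length of one step
def fdEff (prev : List Char) (p : Int × String) : Int :=
  if p.1 > 0 then min p.1 (prev.length : Int) else 0

-- decoded string i (as chars): pSeq ts prev (i+1), starting from prev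
def fdP (ts : List (Int × String)) (prev : List Char) (k : Nat) : List Char :=
  (ts.take k).foldl fdStep prev

theorem fdP_cons (p : Int × String) (ts : List (Int × String)) (prev : List Char) (k : Nat) :
    fdP (p :: ts) prev (k + 1) = fdP ts (fdStep prev p) k := by
  simp [fdP]

theorem fdEff_nonneg (prev : List Char) (p : Int × String) : 0 ≤ fdEff prev p := by
  unfold fdEff; split_ifs with h
  · exact le_min (le_of_lt h) (by positivity)
  · exact le_refl 0

theorem fdEff_le (prev : List Char) (p : Int × String) : fdEff prev p ≤ (prev.length : Int) := by
  unfold fdEff; split_ifs with h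
  · exact min_le_right _ _
  · positivity

theorem fdStep_eq (prev : List Char) (p : Int × String) :
    fdStep prev p = prev.take (fdEff prev p).toNat ++ p.2.toList := by
  unfold fdStep fdEff
  split_ifs with h
  · rw [PySem.List.slice_to _ (le_of_lt h)]
    congr 1
    by_cases hle : p.1 ≤ (prev.length : Int)
    · rw [min_eq_left hle]
    · rw [min_eq_right (by omega)]
      rw [List.take_of_length_le (by omega), List.take_of_length_le (by simp)]
  · simp

theorem fdStep_length (prev : List Char) (p : Int × String) :
    ((fdStep prev p).length : Int) = fdEff prev p + (p.2.toList.length : Int) := by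
  rw [fdStep_eq]
  have h1 := fdEff_nonneg prev p
  have h2 := fdEff_le prev p
  simp [List.length_take]
  omega

-- the prefix-length list: what passF's first component is
def fdF (ts : List (Int × String)) (prev : List Char) : List Int :=
  match ts with
  | [] => []
  | p :: rest => fdEff prev p :: fdF rest (fdStep prev p)

theorem passF_inv (ts : List (Int × String)) :
    ∀ (acc : List Int) (prev : List Char),
      ts.foldl (fun st p =>
          let fj := if p.1 > 0 then min p.1 st.2 else 0
          (st.1 ++ [fj], fj + (p.2.toList.length : Int))) (acc, (prev.length : Int))
        = (acc ++ fdF ts prev, ((ts.foldl fdStep prev).length : Int)) := by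
  induction ts with
  | nil => intro acc prev; simp [fdF]
  | cons p rest ih =>
    intro acc prev
    have he : (if p.1 > 0 then min p.1 (prev.length : Int) else 0) = fdEff prev p := rfl
    simp only [List.foldl_cons, he, fdF]
    rw [← fdStep_length prev p, ih]
    simp

theorem passF_eq (ts : List (Int × String)) :
    (front_decoding_passF ts).1 = fdF ts [] := by
  unfold front_decoding_passF
  have := passF_inv ts [] []
  simp only [List.length_nil, Int.natCast_zero] at this
  rw [this]
  simp

theorem fdF_getD (ts : List (Int × String)) :
    ∀ (j : Nat) (prev : List Char), j < ts.length →
      (fdF ts prev).getD j 0 = fdEff (fdP ts prev j) (ts.getD j (0, "")) := by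
  induction ts with
  | nil => intro j prev h; simp at h
  | cons p rest ih =>
    intro j prev h
    cases j with
    | zero => simp [fdF, fdP]
    | succ j' =>
      simp only [fdF, List.getD_cons_succ, List.getD_cons_succ] at *
      rw [ih j' (fdStep prev p) (by simpa using h), fdP_cons]

theorem fdP_succ (ts : List (Int × String)) :
    ∀ (j : Nat) (prev : List Char), j < ts.length →
      fdP ts prev (j + 1) = fdStep (fdP ts prev j) (ts.getD j (0, "")) := by
  induction ts with
  | nil => intro j prev h; simp at h
  | cons p rest ih =>
    intro j prev h
    cases j with
    | zero => simp [fdP]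
    | succ j' =>
      rw [fdP_cons, fdP_cons, ih j' _ (by simpa using h)]
      simp

-- B's backward walk reconstructs exactly the m-char prefix of decoded string j
theorem collect_spec (ts : List (Int × String)) :
    ∀ (j : Nat) (m : Int) (pieces : List (List Char)), j < ts.length →
      m ≤ ((fdP ts [] (j + 1)).length : Int) →
      (front_decoding_collect ts (fdF ts []) j m pieces).reverse.flatten
        = (fdP ts [] (j + 1)).take m.toNat ++ pieces.reverse.flatten := by
  intro j
  induction j with
  | zero =>
    intro m pieces hj hm
    have he0 : fdEff [] (ts.getD 0 (0, "")) = 0 := by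
      have h1 := fdEff_nonneg [] (ts.getD 0 (0, ""))
      have h2 := fdEff_le [] (ts.getD 0 (0, ""))
      simp only [List.length_nil, Int.natCast_zero] at h2
      omega
    have hf : (fdF ts []).getD 0 0 = 0 := by
      rw [fdF_getD ts 0 [] hj]; exact he0
    have hp1 : fdP ts [] 1 = (ts.getD 0 (0, "")).2.toList := by
      have h := fdP_succ ts 0 [] hj
      rw [h, fdStep_eq]
      have : fdEff (fdP ts [] 0) (ts.getD 0 (0, "")) = 0 := he0
      rw [this]
      simp [fdP]
    rw [front_decoding_collect]
    by_cases hm0 : m > 0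
    · rw [if_pos hm0]
      simp only [hf]
      rw [if_pos hm0]
      rw [PySem.List.slice_to _ (by omega)]
      rw [hp1] at hm
      have h1 : fdP ts [] (0 + 1) = (ts.getD 0 (0, "")).2.toList := hp1
      rw [h1]
      simp
    · rw [if_neg hm0]
      have h0 : m.toNat = 0 := by omega
      simp [h0]
  | succ j' ih =>
    intro m pieces hj hm
    have hf : (fdF ts []).getD (j' + 1) 0 = fdEff (fdP ts [] (j' + 1)) (ts.getD (j' + 1) (0, "")) :=
      fdF_getD ts (j' + 1) [] hj
    set P := fdP ts [] (j' + 1) with hP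
    set p := ts.getD (j' + 1) (0, "") with hp
    have he1 := fdEff_nonneg P p
    have he2 := fdEff_le P p
    have hsucc : fdP ts [] (j' + 2) = P.take (fdEff P p).toNat ++ p.2.toList := by
      rw [fdP_succ ts (j' + 1) [] hj, fdStep_eq]
    have htk : (P.take (fdEff P p).toNat).length = (fdEff P p).toNat := by
      simp only [List.length_take]
      omega
    rw [hsucc] at hm
    have hm' : m ≤ fdEff P p + (p.2.toList.length : Int) := by
      simp only [List.length_append, htk] at hm
      omega
    rw [front_decoding_collect]
    by_cases hm0 : m > 0
    · rw [if_pos hm0]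
      simp only [hf]
      by_cases hgt : m > fdEff P p
      · rw [if_pos hgt, if_pos hgt]
        rw [ih (fdEff P p) _ (by omega) he2]
        rw [PySem.List.slice_to _ (by omega), ← hp, hsucc]
        rw [List.take_append]
        rw [List.take_of_length_le (le_trans (List.length_take_le _ _) (by omega))]
        have h2 : m.toNat - (P.take (fdEff P p).toNat).length = (m - fdEff P p).toNat := by
          rw [htk]; omega
        rw [h2]
        simp
      · rw [if_neg hgt, if_neg hgt]
        rw [ih m _ (by omega) (by omega)]
        rw [hsucc, List.take_append]
        have h2 : m.toNat - (P.take (fdEff P p).toNat).length = 0 := by rw [htk]; omega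
        rw [h2, List.take_take]
        have h3 : min m.toNat (fdEff P p).toNat = m.toNat := by omega
        rw [h3]
        simp
    · rw [if_neg hm0]
      have h0 : m.toNat = 0 := by omega
      simp [h0]

-- B's i-th output string is decoded string i, in full
theorem alt_eq (ts : List (Int × String)) :
    front_decoding_alt ts
      = (List.range ts.length).map (fun i : Nat => ((i : Int), String.ofList (fdP ts [] (i + 1)))) := by
  unfold front_decoding_alt
  rw [passF_eq]
  apply List.map_congr_left
  intro i hi
  have hi' : i < ts.length := List.mem_range.mp hi
  show ((i : Int), String.ofList ((front_decoding_collect ts (fdF ts []) i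
      ((fdF ts []).getD i 0 + (((ts.getD i (0, "")).2.toList.length : Nat) : Int)) []).reverse.flatten))
    = ((i : Int), String.ofList (fdP ts [] (i + 1)))
  have hf : (fdF ts []).getD i 0 = fdEff (fdP ts [] i) (ts.getD i (0, "")) := fdF_getD ts i [] hi'
  set m : Int := (fdF ts []).getD i 0 + ((ts.getD i (0, "")).2.toList.length : Int) with hm
  have he1 := fdEff_nonneg (fdP ts [] i) (ts.getD i (0, ""))
  have he2 := fdEff_le (fdP ts [] i) (ts.getD i (0, ""))
  have hlen : ((fdP ts [] (i + 1)).length : Int) = m := by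
    rw [fdP_succ ts i [] hi', fdStep_length, hm, hf]
  rw [collect_spec ts i m [] hi' (by omega)]
  have : m.toNat = (fdP ts [] (i + 1)).length := by omega
  simp [this]

-- the decoded-strings chain, as A's loop produces it
def fdChain (prev : List Char) : List (Int × String) → List (List Char)
  | [] => []
  | p :: rest => fdStep prev p :: fdChain (fdStep prev p) rest

theorem fdChain_length (ts : List (Int × String)) :
    ∀ prev, (fdChain prev ts).length = ts.length := by
  induction ts with
  | nil => intro prev; simp [fdChain]
  | cons p rest ih => intro prev; simp [fdChain, ih]

theorem fdChain_getD (ts : List (Int × String)) :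
    ∀ (k : Nat) (prev : List Char), k < ts.length →
      (fdChain prev ts).getD k [] = fdP ts prev (k + 1) := by
  induction ts with
  | nil => intro k prev h; simp at h
  | cons p rest ih =>
    intro k prev h
    cases k with
    | zero => simp [fdChain, fdP]
    | succ k' =>
      simp only [fdChain, List.getD_cons_succ]
      rw [ih k' _ (by simpa using h), fdP_cons]

-- loop invariant: from a state whose dict keys are all below i, A's fold appends
-- the enumeration (from i) of the decoded chain
theorem front_decoding_loop (ts : List (Int × String)) :
    ∀ (prev : List Char) (d : PySem.Dict Int String) (i : Int),
      (∀ k ∈ d.keys, k < i) →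
      (ts.foldl front_decoding_step (d, prev, i)).1.items
        = d.items ++ PySem.List.enumerate ((fdChain prev ts).map String.ofList) i := by
  induction ts with
  | nil => intro prev d i _; simp [fdChain, PySem.List.enumerate_nil]
  | cons p rest ih =>
    intro prev d i hk
    have hnc : d.contains i = false := by
      by_contra h
      have : i ∈ d.keys := (PySem.Dict.contains_iff_mem_keys _ _).1 (by
        cases hc : d.contains i with
        | false => exact absurd hc h
        | true => rfl)
      exact absurd (hk i this) (lt_irrefl i)
    have hkeys : ∀ (v : String) (k : Int), k ∈ (d.insert i v).keys → k < i + 1 := by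
      intro v k hmem
      rcases (PySem.Dict.mem_keys_insert _ _ _ _).1 hmem with h | h
      · omega
      · have := hk k h; omega
    have hitems : ∀ (v : String), (d.insert i v).items = d.items ++ [(i, v)] :=
      fun v => PySem.Dict.items_insert_of_not_contains d v hnc
    by_cases hl : p.1 > 0
    · simp only [List.foldl_cons, front_decoding_step, hl, if_pos,
        fdChain, fdStep, List.map_cons, PySem.List.enumerate_cons]
      rw [ih _ _ _ (hkeys _), hitems]
      simp
    · simp only [List.foldl_cons, front_decoding_step, hl, if_false,
        fdChain, fdStep, List.map_cons, PySem.List.enumerate_cons]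
      rw [ih _ _ _ (hkeys _), hitems]
      simp

-- A's output, indexed form
theorem a_eq (ts : List (Int × String)) :
    front_decoding ts
      = (List.range ts.length).map (fun i : Nat => ((i : Int), String.ofList (fdP ts [] (i + 1)))) := by
  unfold front_decoding
  rw [front_decoding_loop ts [] PySem.Dict.empty 0 (by simp [PySem.Dict.keys_empty])]
  have hlen : ((fdChain [] ts).map String.ofList).length = ts.length := by
    simp [fdChain_length]
  apply List.ext_getElem
  · simp [PySem.Dict.empty, PySem.List.length_enumerate, hlen]
  · intro k h1 h2
    simp only [PySem.Dict.empty] at h1 ⊢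
    simp only [List.nil_append] at h1 ⊢
    have hk : k < ts.length := by
      simpa [PySem.List.length_enumerate, hlen] using h1
    rw [PySem.List.getElem_enumerate]
    simp only [List.getElem_map, List.getElem_range]
    have : (fdChain [] ts)[k]'(by rw [fdChain_length]; exact hk) = fdP ts [] (k + 1) := by
      rw [← List.getD_eq_getElem _ [] (by rw [fdChain_length]; exact hk)]
      exact fdChain_getD ts k [] hk
    simp [this]

-- ===== VERDICT (by name: the statement is the Claim_ definition above) =====
theorem front_decoding_spec : Claim_equal_front_decoding := by
  intro ts _
  unfold Spec_front_decoding
  rw [a_eq, alt_eq]
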